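-- pv_equiv track=rewrite | github.com/PLCwithoutP/ExplicitFVMSolver | ExplicitSolver/PrePostProcessing/preprocess/foamMeshReader.py | findLeftRightCells
-- ===== SOURCE A (Python) =====
-- def findLeftRightCells(faceID, cellID, parsedOwners, parsedNbours):
--     ''' This function finds left and right cells of a face'''
--     leftCellID = cellID
--     for faces in parsedNbours:
--         checkFaceID = faces[0]
--         checkCellID = faces[1]
--         if (faceID == checkFaceID and cellID != checkCellID):
--             rightCellID = checkCellID
--     for faces in parsedOwners:
--         checkFaceID = faces[0]
--         checkCellID = faces[1]
--         if (faceID == checkFaceID and cellID != checkCellID):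
--             rightCellID = checkCellID
--     return leftCellID, rightCellID
-- ===== SOURCE B (Python) =====
-- def findLeftRightCells(faceID, cellID, parsedOwners, parsedNbours):
--     ''' This function finds left and right cells of a face'''
--     for faces in reversed(parsedOwners):
--         if faceID == faces[0] and cellID != faces[1]:
--             return cellID, faces[1]
--     for faces in reversed(parsedNbours):
--         if faceID == faces[0] and cellID != faces[1]:
--             return cellID, faces[1]
--     raise LookupError("no adjacent cell found for face %s" % faceID)
-- ===== Notes on version B (the rewrite author's own statement) =====
-- stated objective: alternative
-- what changed: Replaces A's two forward full scans with last-assignment-wins state by reversed-order early-return scans (owners first, then neighbours), returning at the first hit instead of remembering the last one.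
import Mathlib
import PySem

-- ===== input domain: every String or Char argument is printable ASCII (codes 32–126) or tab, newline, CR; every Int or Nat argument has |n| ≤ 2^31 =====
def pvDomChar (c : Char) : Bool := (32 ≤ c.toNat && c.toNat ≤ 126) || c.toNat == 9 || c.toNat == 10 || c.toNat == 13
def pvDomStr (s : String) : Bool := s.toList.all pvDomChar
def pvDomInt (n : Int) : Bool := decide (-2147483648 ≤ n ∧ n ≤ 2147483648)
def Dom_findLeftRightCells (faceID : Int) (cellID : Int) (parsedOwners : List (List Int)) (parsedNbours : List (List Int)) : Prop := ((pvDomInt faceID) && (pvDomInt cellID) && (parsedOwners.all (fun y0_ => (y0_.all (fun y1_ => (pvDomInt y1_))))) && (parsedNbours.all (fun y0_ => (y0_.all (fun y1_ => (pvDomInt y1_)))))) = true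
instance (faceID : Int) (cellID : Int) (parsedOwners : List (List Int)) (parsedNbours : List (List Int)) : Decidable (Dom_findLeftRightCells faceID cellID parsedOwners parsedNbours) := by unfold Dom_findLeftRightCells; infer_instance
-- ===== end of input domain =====

-- B replaces A's two forward full scans (last assignment wins) by reversed-order
-- early-return scans, owners first; same return value wherever A returns (Pre_).


-- ===== PORT A =====
-- one iteration of A's loops: update the (optional) rightCellID on a match;
-- a row with fewer than two entries raises IndexError in Python (excluded by Pre_)
def pvStepA (faceID : Int) (cellID : Int) (acc : Option Int) (faces : List Int) : Option Int :=
  match PySem.List.pyGet? faces 0, PySem.List.pyGet? faces 1 with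
  | some checkFaceID, some checkCellID =>
      if faceID = checkFaceID ∧ cellID ≠ checkCellID then some checkCellID else acc
  | _, _ => acc

def findLeftRightCells (faceID : Int) (cellID : Int) (parsedOwners : List (List Int)) (parsedNbours : List (List Int)) : Int × Int :=
  let leftCellID := cellID
  let r := parsedOwners.foldl (pvStepA faceID cellID)
             (parsedNbours.foldl (pvStepA faceID cellID) none)
  (leftCellID, r.getD 0)  -- r = none is Python's UnboundLocalError, excluded by Pre_

-- ===== PORT B =====
-- first matching row of a list (B scans rows.reverse with early return)
def pvFindB (faceID : Int) (cellID : Int) : List (List Int) → Option Int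
  | [] => none
  | faces :: rest =>
    match PySem.List.pyGet? faces 0, PySem.List.pyGet? faces 1 with
    | some f, some c =>
        if faceID = f ∧ cellID ≠ c then some c else pvFindB faceID cellID rest
    | _, _ => pvFindB faceID cellID rest  -- Python raises IndexError here; excluded by Pre_

def findLeftRightCells_alt (faceID : Int) (cellID : Int) (parsedOwners : List (List Int)) (parsedNbours : List (List Int)) : Int × Int :=
  match pvFindB faceID cellID parsedOwners.reverse with
  | some c => (cellID, c)
  | none =>
    match pvFindB faceID cellID parsedNbours.reverse with
    | some c => (cellID, c)
    | none => (cellID, 0)  -- Source B raises LookupError here; excluded by Pre_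

-- ===== PRECONDITION & SPEC =====
-- Pre_ excludes exactly the inputs on which A raises: a row with fewer than two
-- entries (IndexError) and the case where no row matches (UnboundLocalError).
def Pre_findLeftRightCells (faceID : Int) (cellID : Int) (parsedOwners : List (List Int)) (parsedNbours : List (List Int)) : Prop :=
  (∀ faces ∈ parsedNbours ++ parsedOwners, 2 ≤ faces.length) ∧
  (∃ faces ∈ parsedNbours ++ parsedOwners,
     PySem.List.pyGet? faces 0 = some faceID ∧ PySem.List.pyGet? faces 1 ≠ some cellID)
instance (faceID : Int) (cellID : Int) (parsedOwners : List (List Int)) (parsedNbours : List (List Int)) : Decidable (Pre_findLeftRightCells faceID cellID parsedOwners parsedNbours) := by unfold Pre_findLeftRightCells; infer_instance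

def pvWitness_findLeftRightCells : Int × Int × List (List Int) × List (List Int) := (1, 5, [[1, 2]], [])

def Spec_findLeftRightCells (faceID : Int) (cellID : Int) (parsedOwners : List (List Int)) (parsedNbours : List (List Int)) (out : Int × Int) : Prop := out = findLeftRightCells_alt faceID cellID parsedOwners parsedNbours
instance (faceID : Int) (cellID : Int) (parsedOwners : List (List Int)) (parsedNbours : List (List Int)) (out : Int × Int) : Decidable (Spec_findLeftRightCells faceID cellID parsedOwners parsedNbours out) := by unfold Spec_findLeftRightCells; infer_instance

-- ===== CLAIM (what is proved, stated in full; the proofs are below) =====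
def Claim_equal_findLeftRightCells : Prop := ∀ (faceID : Int) (cellID : Int) (parsedOwners : List (List Int)) (parsedNbours : List (List Int)), Dom_findLeftRightCells faceID cellID parsedOwners parsedNbours → Pre_findLeftRightCells faceID cellID parsedOwners parsedNbours → Spec_findLeftRightCells faceID cellID parsedOwners parsedNbours (findLeftRightCells faceID cellID parsedOwners parsedNbours)

-- ===== LEMMAS AND PROOFS =====

-- first match of an appended list: left side first
theorem pvFindB_append (faceID cellID : Int) (xs ys : List (List Int)) :
    pvFindB faceID cellID (xs ++ ys) =
      match pvFindB faceID cellID xs with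
      | some c => some c
      | none => pvFindB faceID cellID ys := by
  induction xs with
  | nil => rfl
  | cons faces rest ih =>
    simp only [List.cons_append, pvFindB]
    rcases PySem.List.pyGet? faces 0 with _ | f <;> rcases PySem.List.pyGet? faces 1 with _ | c <;>
      simp [ih] <;> split_ifs <;> rfl

-- a forward foldl with last-assignment-wins equals the first match of the reverse,
-- with the initial accumulator as fallback
theorem foldl_eq_findB_reverse (faceID cellID : Int) (rows : List (List Int)) (acc : Option Int) :
    rows.foldl (pvStepA faceID cellID) acc =
      match pvFindB faceID cellID rows.reverse with
      | some c => some c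
      | none => acc := by
  induction rows generalizing acc with
  | nil => rfl
  | cons faces rest ih =>
    simp only [List.foldl_cons, List.reverse_cons, ih, pvFindB_append, pvStepA, pvFindB]
    rcases pvFindB faceID cellID rest.reverse with _ | c
    · rcases PySem.List.pyGet? faces 0 with _ | f <;> rcases PySem.List.pyGet? faces 1 with _ | c' <;>
        simp <;> split_ifs <;> rfl
    · rfl

-- on rows that all have at least two entries, the scan finds a match whenever one exists
theorem pvFindB_ne_none (faceID cellID : Int) (rows : List (List Int))
    (hlen : ∀ faces ∈ rows, 2 ≤ faces.length)
    (hex : ∃ faces ∈ rows, PySem.List.pyGet? faces 0 = some faceID ∧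
                           PySem.List.pyGet? faces 1 ≠ some cellID) :
    pvFindB faceID cellID rows ≠ none := by
  induction rows with
  | nil => simp at hex
  | cons g rest ih =>
    obtain ⟨a, b, t, rfl⟩ : ∃ a b t, g = a :: b :: t := by
      have := hlen g (List.mem_cons_self ..)
      match g with
      | a :: b :: t => exact ⟨a, b, t, rfl⟩
    have hg0 : PySem.List.pyGet? (a :: b :: t) 0 = some a :=
      PySem.List.pyGet?_zero_cons a (b :: t)
    have hg1 : PySem.List.pyGet? (a :: b :: t) 1 = some b := by
      have h := PySem.List.pyGet?_cons_succ (x := a) (xs := b :: t) (n := 0)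
      simpa using h
    simp only [pvFindB, hg0, hg1]
    obtain ⟨faces, hmem, h0, h1⟩ := hex
    rcases List.mem_cons.1 hmem with rfl | hm
    · rw [hg0] at h0; rw [hg1] at h1
      have : faceID = a ∧ cellID ≠ b :=
        ⟨(Option.some.inj h0).symm, fun hc => h1 (by rw [hc])⟩
      simp [this]
    · split_ifs with h
      · simp
      · exact ih (fun f hf => hlen f (List.mem_cons_of_mem _ hf)) ⟨faces, hm, h0, h1⟩

-- ===== VERDICT (by name: the statement is the Claim_ definition above) =====
theorem findLeftRightCells_spec : Claim_equal_findLeftRightCells := by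
  intro faceID cellID parsedOwners parsedNbours _ hpre
  unfold Spec_findLeftRightCells findLeftRightCells findLeftRightCells_alt
  simp only [foldl_eq_findB_reverse]
  rcases ho : pvFindB faceID cellID parsedOwners.reverse with _ | c
  · rcases hn : pvFindB faceID cellID parsedNbours.reverse with _ | c
    · -- impossible: Pre_ provides a matching row, but both scans ended in none
      exfalso
      obtain ⟨faces, hmem, h0, h1⟩ := hpre.2
      rcases List.mem_append.1 hmem with hm | hm
      · exact pvFindB_ne_none faceID cellID parsedNbours.reverse
          (fun f hf => hpre.1 f (List.mem_append.2 (Or.inl (List.mem_reverse.1 hf))))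
          ⟨faces, List.mem_reverse.2 hm, h0, h1⟩ hn
      · exact pvFindB_ne_none faceID cellID parsedOwners.reverse
          (fun f hf => hpre.1 f (List.mem_append.2 (Or.inr (List.mem_reverse.1 hf))))
          ⟨faces, List.mem_reverse.2 hm, h0, h1⟩ ho
    · rfl
  · rfl
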